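-- pv_equiv track=rewrite | github.com/rhythm-semwal/DS-Algo | Hotel occurences.py | hotel_occurences
-- ===== SOURCE A (Python) =====
-- def hotel_occurences(A):
--     freq_dict = dict()
--     result = list()
--
--     for each in A:
--         if each in freq_dict:
--             freq_dict[each] += 1
--         else:
--             freq_dict[each] = 1
--
--     for each in A:
--         if freq_dict[each] > 1:
--             freq_dict[each] -= 1
--         else:
--             result.append(each)
--
--     return result
-- ===== SOURCE B (Python) =====
-- def hotel_occurences(A):
--     seen = set()
--     out = []
--     for each in reversed(A):
--         if each not in seen:
--             seen.add(each)
--             out.append(each)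
--     return list(reversed(out))
-- ===== Notes on version B (the rewrite author's own statement) =====
-- stated objective: simpler
-- what changed: Replaces the two forward passes with a frequency dict (count, then decrement and emit when the count hits 1) by a single reverse scan that keeps a seen-set, collects first occurrences of the reversed list, and reverses the collected list at the end.
import Mathlib
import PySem

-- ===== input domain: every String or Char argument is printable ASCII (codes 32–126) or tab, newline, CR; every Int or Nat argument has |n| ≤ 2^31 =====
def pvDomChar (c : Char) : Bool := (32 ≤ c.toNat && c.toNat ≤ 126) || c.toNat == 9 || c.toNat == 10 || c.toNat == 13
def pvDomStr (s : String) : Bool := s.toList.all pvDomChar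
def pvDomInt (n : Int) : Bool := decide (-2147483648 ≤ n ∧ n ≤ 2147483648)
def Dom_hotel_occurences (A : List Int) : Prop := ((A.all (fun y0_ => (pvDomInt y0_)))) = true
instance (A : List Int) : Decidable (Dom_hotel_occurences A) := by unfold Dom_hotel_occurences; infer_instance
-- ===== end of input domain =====

-- B replaces A's two forward passes over a frequency dict by a single reverse scan with a
-- seen-set, reversing the collected list at the end (objective: simpler).

-- ===== PORT A =====
-- first loop: build the frequency dict (freq_dict[each] is always present in the second
-- loop, so the lookup freq_dict[each] is rendered total with getD; it never hits the default)
def hotel_occurences (A : List Int) : List Int :=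
  let freq : PySem.Dict Int Int :=
    A.foldl (fun d each =>
      if d.contains each then d.modify each 0 (· + 1) else d.insert each 1)
      PySem.Dict.empty
  let st :=
    A.foldl (fun (st : PySem.Dict Int Int × List Int) each =>
      if st.1.getD each 0 > 1 then (st.1.modify each 0 (· - 1), st.2)
      else (st.1, st.2 ++ [each]))
      (freq, [])
  st.2

-- ===== PORT B =====
def hotel_occurences_alt (A : List Int) : List Int :=
  let st :=
    A.reverse.foldl (fun (st : PySem.Set Int × List Int) each =>
      if st.1.contains each then st else (st.1.add each, st.2 ++ [each]))
      (PySem.Set.empty, [])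
  st.2.reverse

-- ===== PRECONDITION & SPEC =====
def Spec_hotel_occurences (A : List Int) (out : List Int) : Prop := out = hotel_occurences_alt A
instance (A : List Int) (out : List Int) : Decidable (Spec_hotel_occurences A out) := by unfold Spec_hotel_occurences; infer_instance

-- ===== CLAIM (what is proved, stated in full; the proofs are below) =====
def Claim_equal_hotel_occurences : Prop := ∀ (A : List Int), Dom_hotel_occurences A → Spec_hotel_occurences A (hotel_occurences A)

-- ===== LEMMAS AND PROOFS =====

-- the common characterisation: keep an element iff it does not occur later (last occurrences, in order)
def lastKeep : List Int → List Int
  | [] => []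
  | x :: xs => if x ∈ xs then lastKeep xs else x :: lastKeep xs

-- A's first-loop step is exactly 'modify each 0 (+1)'
theorem stepA1_eq (d : PySem.Dict Int Int) (x : Int) :
    (if d.contains x then d.modify x 0 (· + 1) else d.insert x 1) = d.modify x 0 (· + 1) := by
  by_cases h : d.contains x = true
  · simp [h]
  · have hf : d.contains x = false := by simpa using h
    simp [h, PySem.Dict.modify, PySem.Dict.getD_of_not_contains _ _ hf]

-- A's second loop, under the counting invariant, appends lastKeep
theorem loopA (L : List Int) (d : PySem.Dict Int Int) (acc : List Int)
    (h : ∀ x ∈ L, d.getD x 0 = L.count x) :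
    (L.foldl (fun (st : PySem.Dict Int Int × List Int) each =>
      if st.1.getD each 0 > 1 then (st.1.modify each 0 (· - 1), st.2)
      else (st.1, st.2 ++ [each])) (d, acc)).2 = acc ++ lastKeep L := by
  induction L generalizing d acc with
  | nil => simp [lastKeep]
  | cons x xs ih =>
    have hx : d.getD x 0 = (xs.count x : Int) + 1 := by
      simpa [List.count_cons] using h x (by simp)
    rw [List.foldl_cons]
    by_cases hmem : x ∈ xs
    · have hcnt : 1 ≤ xs.count x := List.one_le_count_iff.mpr hmem
      have hgt : d.getD x 0 > 1 := by omega
      rw [if_pos hgt]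
      have hinv : ∀ y ∈ xs, (d.modify x 0 (· - 1)).getD y 0 = (xs.count y : Int) := by
        intro y hy
        by_cases hyx : y = x
        · subst hyx
          rw [PySem.Dict.getD_modify_self, hx]
          ring
        · rw [PySem.Dict.getD_modify_of_ne _ _ _ hyx, h y (by simp [hy]),
            List.count_cons_of_ne (Ne.symm hyx)]
      rw [ih _ _ hinv, lastKeep, if_pos hmem]
    · have hcnt : xs.count x = 0 := List.count_eq_zero.mpr hmem
      have hle : ¬ d.getD x 0 > 1 := by omega
      rw [if_neg hle]
      have hinv : ∀ y ∈ xs, d.getD y 0 = (xs.count y : Int) := by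
        intro y hy
        have hyx : y ≠ x := fun e => hmem (e ▸ hy)
        rw [h y (by simp [hy]), List.count_cons_of_ne (Ne.symm hyx)]
      rw [ih _ _ hinv, lastKeep, if_neg hmem]
      simp

-- B's core loop: membership of the seen-set, and the collected list reversed
theorem loopB (L : List Int) :
    (∀ y, y ∈ (L.reverse.foldl (fun (st : PySem.Set Int × List Int) each =>
        if st.1.contains each then st else (st.1.add each, st.2 ++ [each]))
        (PySem.Set.empty, [])).1 ↔ y ∈ L) ∧
    (L.reverse.foldl (fun (st : PySem.Set Int × List Int) each =>
        if st.1.contains each then st else (st.1.add each, st.2 ++ [each]))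
        (PySem.Set.empty, [])).2.reverse = lastKeep L := by
  induction L with
  | nil => simp [lastKeep, PySem.Set.empty]
  | cons x xs ih =>
    obtain ⟨ihmem, ihout⟩ := ih
    rw [List.reverse_cons, List.foldl_append, List.foldl_cons, List.foldl_nil]
    by_cases hmem : x ∈ xs
    · have hc : (xs.reverse.foldl (fun (st : PySem.Set Int × List Int) each =>
          if st.1.contains each then st else (st.1.add each, st.2 ++ [each]))
          (PySem.Set.empty, [])).1.contains x = true :=
        (PySem.Set.contains_iff _ _).mpr ((ihmem x).mpr hmem)
      rw [if_pos hc]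
      refine ⟨fun y => ?_, by rw [ihout, lastKeep, if_pos hmem]⟩
      rw [ihmem y, List.mem_cons]
      constructor
      · exact Or.inr
      · rintro (rfl | h)
        · exact hmem
        · exact h
    · have hc : (xs.reverse.foldl (fun (st : PySem.Set Int × List Int) each =>
          if st.1.contains each then st else (st.1.add each, st.2 ++ [each]))
          (PySem.Set.empty, [])).1.contains x = false := by
        rw [Bool.eq_false_iff]
        intro h
        exact hmem ((ihmem x).mp ((PySem.Set.contains_iff _ _).mp h))
      have hcn : ¬ ((xs.reverse.foldl (fun (st : PySem.Set Int × List Int) each =>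
          if st.1.contains each then st else (st.1.add each, st.2 ++ [each]))
          (PySem.Set.empty, [])).1.contains x = true) := by
        rw [hc]
        simp
      rw [if_neg hcn]
      refine ⟨fun y => ?_, ?_⟩
      · rw [PySem.Set.mem_add, ihmem y, List.mem_cons]
        tauto
      · rw [List.reverse_append, List.reverse_cons, List.reverse_nil, List.nil_append,
          List.singleton_append, ihout, lastKeep, if_neg hmem]

theorem portA_eq (A : List Int) : hotel_occurences A = lastKeep A := by
  show (A.foldl (fun (st : PySem.Dict Int Int × List Int) each =>
      if st.1.getD each 0 > 1 then (st.1.modify each 0 (· - 1), st.2)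
      else (st.1, st.2 ++ [each]))
      (A.foldl (fun d each =>
        if d.contains each then d.modify each 0 (· + 1) else d.insert each 1)
        PySem.Dict.empty, [])).2 = lastKeep A
  rw [PySem.List.foldl_congr_mem A _ (fun d each => d.modify each 0 (· + 1)) _
    (fun d x _ => stepA1_eq d x)]
  exact loopA A _ [] (fun x _ => by
    rw [PySem.Dict.getD_foldl_modify_add_one]
    simp)

theorem portB_eq (A : List Int) : hotel_occurences_alt A = lastKeep A := by
  exact (loopB A).2

-- ===== VERDICT (by name: the statement is the Claim_ definition above) =====
theorem hotel_occurences_spec : Claim_equal_hotel_occurences := by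
  intro A _
  unfold Spec_hotel_occurences
  rw [portA_eq, portB_eq]
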